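-- pv_equiv track=rewrite | github.com/DevilFruitDev/calculator | ui.py | get_spiral_indices
-- ===== SOURCE A (Python) =====
-- import math  # Added for some effects
--
-- def get_spiral_indices(num_buttons):
--     """Generate spiral indices for buttons."""
--     # Estimate grid dimensions (assumes rectangular grid)
--     grid_size = int(math.sqrt(num_buttons))
--     if grid_size * grid_size < num_buttons:
--         grid_size += 1
--
--     # Create empty 2D grid
--     grid = [[-1 for _ in range(grid_size)] for _ in range(grid_size)]
--
--     # Map 1D indices to 2D grid
--     idx = 0
--     for row in range(grid_size):
--         for col in range(grid_size):
--             if idx < num_buttons: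
--                 grid[row][col] = idx
--                 idx += 1
--
--     # Create spiral indices
--     result = []
--     top, bottom = 0, grid_size - 1
--     left, right = 0, grid_size - 1
--
--     while top <= bottom and left <= right:
--         # Top row
--         for col in range(left, right + 1):
--             if grid[top][col] != -1:
--                 result.append(grid[top][col])
--         top += 1
--
--         # Right column
--         for row in range(top, bottom + 1):
--             if grid[row][right] != -1:
--                 result.append(grid[row][right])
--         right -= 1
--
--         # Bottom row
--         if top <= bottom:
--             for col in range(right, left - 1, -1):
--                 if grid[bottom][col] != -1:
--                     result.append(grid[bottom][col])
--             bottom -= 1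
--
--         # Left column
--         if left <= right:
--             for row in range(bottom, top - 1, -1):
--                 if grid[row][left] != -1:
--                     result.append(grid[row][left])
--             left += 1
--
--     return result
-- ===== SOURCE B (Python) =====
-- import math
--
-- def get_spiral_indices(num_buttons):
--     """Spiral indices by per-ring arithmetic: no grid is built; each ring's four
--     sides are emitted as arithmetic progressions of r*g+c, filtered to < num_buttons."""
--     g = math.isqrt(num_buttons)
--     if g * g < num_buttons:
--         g += 1
--     out = []
--     for k in range((g + 1) // 2):
--         hi = g - 1 - k
--         ring = [k * g + c for c in range(k, hi + 1)]
--         ring += [r * g + hi for r in range(k + 1, hi + 1)]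
--         if k < hi:
--             ring += [hi * g + c for c in range(hi - 1, k - 1, -1)]
--             ring += [r * g + k for r in range(hi - 1, k, -1)]
--         out.extend(i for i in ring if i < num_buttons)
--     return out
-- ===== Notes on version B (the rewrite author's own statement) =====
-- stated objective: alternative
-- what changed: B drops A's 2D grid construction/fill and shrinking-boundary scan entirely and instead emits each spiral ring directly as four arithmetic progressions of r*g+c, filtered to < num_buttons.
import Mathlib
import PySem

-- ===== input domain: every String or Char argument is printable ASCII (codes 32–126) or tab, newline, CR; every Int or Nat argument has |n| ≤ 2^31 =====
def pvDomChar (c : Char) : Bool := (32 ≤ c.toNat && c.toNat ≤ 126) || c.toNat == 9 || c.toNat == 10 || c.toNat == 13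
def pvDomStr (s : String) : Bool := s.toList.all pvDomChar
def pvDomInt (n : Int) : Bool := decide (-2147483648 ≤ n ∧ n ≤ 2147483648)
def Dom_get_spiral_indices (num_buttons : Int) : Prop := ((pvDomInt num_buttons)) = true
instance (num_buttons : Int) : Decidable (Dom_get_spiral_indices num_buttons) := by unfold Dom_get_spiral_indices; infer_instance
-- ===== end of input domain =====

-- B replaces A's grid construction + shrinking-boundary scan by per-ring arithmetic
-- progressions filtered to < num_buttons (objective: alternative algorithm, same cost).

-- ===== PORT A =====

-- grid[i][j] for the spiral scan; every read is in range there, so the defaults are never consulted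
def pvGridAt (grid : List (List Int)) (i j : Int) : Int :=
  PySem.List.pyGetD (PySem.List.pyGetD grid i []) j (-1)

-- the two nested fill loops ('grid[row][col] = idx; idx += 1'); state = (grid, idx)
def pvFillLoop (num_buttons grid_size : Int) (st : List (List Int) × Int) :
    List (List Int) × Int :=
  (PySem.List.pyRange 0 grid_size 1).foldl (fun st row =>
    (PySem.List.pyRange 0 grid_size 1).foldl (fun st col =>
      if st.2 < num_buttons then
        (PySem.List.pySetD st.1 row
          (PySem.List.pySetD (PySem.List.pyGetD st.1 row []) col st.2), st.2 + 1)
      else st) st) st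

-- the while loop over the four shrinking boundaries; `result` is the accumulator
-- (fuel = an upper bound on the iteration count, only to make the recursion structural;
-- the caller passes grid_size+1, which always suffices since top/bottom close in each turn)
def pvSpiral (num_buttons : Int) (grid : List (List Int)) (fuel : Nat)
    (top bottom left right : Int) (result : List Int) : List Int :=
  match fuel with
  | 0 => result
  | Nat.succ fuel =>
    if top ≤ bottom ∧ left ≤ right then
      let r1 := (PySem.List.pyRange left (right + 1) 1).foldl
        (fun acc col => if pvGridAt grid top col ≠ -1 then acc ++ [pvGridAt grid top col] else acc)
        result
      let top1 := top + 1
      let r2 := (PySem.List.pyRange top1 (bottom + 1) 1).foldl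
        (fun acc row => if pvGridAt grid row right ≠ -1 then acc ++ [pvGridAt grid row right] else acc)
        r1
      let right1 := right - 1
      let r3 := if top1 ≤ bottom then
          (PySem.List.pyRange right1 (left - 1) (-1)).foldl
            (fun acc col => if pvGridAt grid bottom col ≠ -1 then acc ++ [pvGridAt grid bottom col] else acc)
            r2
        else r2
      let bottom1 := if top1 ≤ bottom then bottom - 1 else bottom
      let r4 := if left ≤ right1 then
          (PySem.List.pyRange bottom1 (top1 - 1) (-1)).foldl
            (fun acc row => if pvGridAt grid row left ≠ -1 then acc ++ [pvGridAt grid row left] else acc)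
            r3
        else r3
      let left1 := if left ≤ right1 then left + 1 else left
      pvSpiral num_buttons grid fuel top1 bottom1 left1 right1 r4
    else result

def get_spiral_indices (num_buttons : Int) : List Int :=
  let gs := Int.sqrt num_buttons  -- int(math.sqrt(num_buttons)); exact on the stated |n| ≤ 2^31 domain
  let grid_size := if gs * gs < num_buttons then gs + 1 else gs
  let grid := (PySem.List.pyRange 0 grid_size 1).map (fun _ =>
    (PySem.List.pyRange 0 grid_size 1).map (fun _ => (-1 : Int)))
  let st := pvFillLoop num_buttons grid_size (grid, 0)
  pvSpiral num_buttons st.1 (grid_size + 1).toNat 0 (grid_size - 1) 0 (grid_size - 1) []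

-- ===== PORT B =====

-- one ring of Source B's loop body: the four arithmetic progressions, filtered
def pvRing (num_buttons g k : Int) : List Int :=
  let hi := g - 1 - k
  let ring := (PySem.List.pyRange k (hi + 1) 1).map (fun c => k * g + c)
  let ring := ring ++ (PySem.List.pyRange (k + 1) (hi + 1) 1).map (fun r => r * g + hi)
  let ring := if k < hi then
      (ring ++ (PySem.List.pyRange (hi - 1) (k - 1) (-1)).map (fun c => hi * g + c))
        ++ (PySem.List.pyRange (hi - 1) k (-1)).map (fun r => r * g + k)
    else ring
  ring.filter (fun i => decide (i < num_buttons))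

def get_spiral_indices_alt (num_buttons : Int) : List Int :=
  let g0 := Int.sqrt num_buttons  -- math.isqrt(num_buttons)
  let g := if g0 * g0 < num_buttons then g0 + 1 else g0
  (PySem.List.pyRange 0 (PySem.Int.floordiv (g + 1) 2) 1).foldl
    (fun out k => out ++ pvRing num_buttons g k) []

-- ===== PRECONDITION & SPEC =====
-- Pre_ excludes negative num_buttons, on which A raises ValueError (math.sqrt of a negative).
def Pre_get_spiral_indices (num_buttons : Int) : Prop := 0 ≤ num_buttons
instance (num_buttons : Int) : Decidable (Pre_get_spiral_indices num_buttons) := by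
  unfold Pre_get_spiral_indices; infer_instance
def pvWitness_get_spiral_indices : Int := 7

def Spec_get_spiral_indices (num_buttons : Int) (out : List Int) : Prop :=
  out = get_spiral_indices_alt num_buttons
instance (num_buttons : Int) (out : List Int) : Decidable (Spec_get_spiral_indices num_buttons out) := by
  unfold Spec_get_spiral_indices; infer_instance

-- ===== CLAIM (what is proved, stated in full; the proofs are below) =====
def Claim_equal_get_spiral_indices : Prop := ∀ (num_buttons : Int), Dom_get_spiral_indices num_buttons → Pre_get_spiral_indices num_buttons → Spec_get_spiral_indices num_buttons (get_spiral_indices num_buttons)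

-- ===== LEMMAS AND PROOFS =====

-- row r of the grid after its first c cells have been visited by the fill loop
def pvRowP (n : Int) (g r c : Nat) : List Int :=
  (List.range g).map (fun j =>
    if j < c ∧ ((r * g + j : Nat) : Int) < n then ((r * g + j : Nat) : Int) else -1)

-- whole grid when the fill loop is at row r, column c
def pvGridP (n : Int) (g r c : Nat) : List (List Int) :=
  (List.range g).map (fun i =>
    if i < r then pvRowP n g i g else if i = r then pvRowP n g r c else pvRowP n g i 0)

theorem pv_set_map_range {β : Type} (f : Nat → β) (m r : Nat) (v : β) :
    ((List.range m).map f).set r v = (List.range m).map (fun i => if i = r then v else f i) := by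
  apply List.ext_getElem
  · simp only [List.length_set, List.length_map, List.length_range]
  · intro i h1 h2
    simp only [List.getElem_set, List.getElem_map, List.getElem_range]
    rcases eq_or_ne i r with h | h
    · rw [if_pos h.symm, if_pos h]
    · rw [if_neg (Ne.symm h), if_neg h]

theorem pv_foldl_append_ite {α β : Type} (p : α → Prop) [DecidablePred p] (f : α → β)
    (l : List α) (acc : List β) :
    l.foldl (fun acc x => if p x then acc ++ [f x] else acc) acc
      = acc ++ (l.filter (fun x => decide (p x))).map f := by
  induction l generalizing acc with
  | nil => simp
  | cons y l ih =>
    simp only [List.foldl_cons, List.filter_cons]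
    by_cases h : p y <;> simp [h, ih]

theorem pv_fill_inner (n : Int) (g r : Nat) (hr : r < g) :
    ∀ (m c : Nat), c + m = g →
    (List.range' c m).foldl
      (fun (st : List (List Int) × Int) (col : Nat) =>
        if st.2 < n then
          (PySem.List.pySetD st.1 (r : Int)
            (PySem.List.pySetD (PySem.List.pyGetD st.1 (r : Int) []) (col : Int) st.2), st.2 + 1)
        else st)
      (pvGridP n g r c, min ((r * g + c : Nat) : Int) n)
    = (pvGridP n g r g, min ((r * g + g : Nat) : Int) n) := by
  intro m
  induction m with
  | zero =>
    intro c hc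
    have : c = g := by omega
    subst this
    simp
  | succ m ih =>
    intro c hc
    have hcg : c < g := by omega
    rw [List.range'_succ, List.foldl_cons]
    have hrowget : PySem.List.pyGetD (pvGridP n g r c) (r : Int) [] = pvRowP n g r c := by
      rw [PySem.List.pyGetD_natCast, pvGridP, PySem.List.getD_map_range _ _ _ _ hr]
      simp
    by_cases hlt : ((r * g + c : Nat) : Int) < n
    · rw [min_eq_left (le_of_lt hlt)]
      rw [if_pos hlt, hrowget]
      have hrow : PySem.List.pySetD (pvRowP n g r c) (c : Int) ((r * g + c : Nat) : Int)
          = pvRowP n g r (c + 1) := by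
        rw [PySem.List.pySetD_natCast, pvRowP, pv_set_map_range _ _ _ _, pvRowP]
        apply List.map_congr_left
        intro j hj
        rcases eq_or_ne j c with h | h
        · subst h
          rw [if_pos rfl, if_pos ⟨by omega, hlt⟩]
        · rw [if_neg h, if_congr (show (j < c ∧ ((r * g + j : Nat) : Int) < n) ↔
            (j < c + 1 ∧ ((r * g + j : Nat) : Int) < n) from by
            constructor <;> (rintro ⟨h1, h2⟩; exact ⟨by omega, h2⟩)) rfl rfl]
      have hgrid : PySem.List.pySetD (pvGridP n g r c) (r : Int) (pvRowP n g r (c + 1))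
          = pvGridP n g r (c + 1) := by
        rw [PySem.List.pySetD_natCast, pvGridP, pv_set_map_range _ _ _ _, pvGridP]
        apply List.map_congr_left
        intro i hi
        rcases eq_or_ne i r with h | h
        · subst h
          rw [if_pos rfl, if_neg (lt_irrefl i), if_pos rfl]
        · rw [if_neg h]
          by_cases hir : i < r
          · rw [if_pos hir, if_pos hir]
          · rw [if_neg hir, if_neg hir, if_neg h, if_neg h]
      rw [hrow, hgrid]
      have hidx : ((r * g + c : Nat) : Int) + 1 = min ((r * g + (c + 1) : Nat) : Int) n := by
        rw [min_eq_left (by push_cast at hlt ⊢; omega)]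
        push_cast; ring
      rw [hidx]
      exact ih (c + 1) (by omega)
    · have hge : n ≤ ((r * g + c : Nat) : Int) := le_of_not_gt hlt
      rw [min_eq_right hge, if_neg (lt_irrefl n)]
      have hrow : pvRowP n g r c = pvRowP n g r (c + 1) := by
        rw [pvRowP, pvRowP]
        apply List.map_congr_left
        intro j hj
        rcases eq_or_ne j c with h | h
        · subst h
          rw [if_neg (by omega), if_neg (fun ⟨h1, h2⟩ => absurd h2 (not_lt.mpr hge))]
        · rw [if_congr (show (j < c ∧ ((r * g + j : Nat) : Int) < n) ↔
            (j < c + 1 ∧ ((r * g + j : Nat) : Int) < n) from by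
            constructor <;> (rintro ⟨h1, h2⟩; exact ⟨by omega, h2⟩)) rfl rfl]
      have hgridstep : pvGridP n g r c = pvGridP n g r (c + 1) := by
        rw [pvGridP, pvGridP]
        apply List.map_congr_left
        intro i hi
        rcases eq_or_ne i r with h | h
        · subst h
          rw [if_neg (lt_irrefl i), if_pos rfl, if_neg (lt_irrefl i), if_pos rfl, hrow]
        · by_cases hir : i < r
          · rw [if_pos hir, if_pos hir]
          · rw [if_neg hir, if_neg hir, if_neg h, if_neg h]
      have hmin : min ((r * g + (c + 1) : Nat) : Int) n = n :=
        min_eq_right (by push_cast at hge ⊢; omega)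
      have hstate : (pvGridP n g r c, n) = (pvGridP n g r (c + 1), min ((r * g + (c + 1) : Nat) : Int) n) := by
        rw [hgridstep, hmin]
      rw [hstate]
      exact ih (c + 1) (by omega)

theorem pv_fill_outer (n : Int) (g : Nat) :
    ∀ (m r : Nat), r + m = g →
    (List.range' r m).foldl
      (fun (st : List (List Int) × Int) (row : Nat) =>
        (List.range g).foldl
          (fun (st : List (List Int) × Int) (col : Nat) =>
            if st.2 < n then
              (PySem.List.pySetD st.1 (row : Int)
                (PySem.List.pySetD (PySem.List.pyGetD st.1 (row : Int) []) (col : Int) st.2), st.2 + 1)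
            else st) st)
      (pvGridP n g r 0, min ((r * g : Nat) : Int) n)
    = (pvGridP n g g 0, min ((g * g : Nat) : Int) n) := by
  intro m
  induction m with
  | zero =>
    intro r hrm
    have : r = g := by omega
    subst this
    rfl
  | succ m ih =>
    intro r hrm
    have hr : r < g := by omega
    rw [List.range'_succ, List.foldl_cons]
    have hinner := pv_fill_inner n g r hr g 0 (by omega)
    rw [← List.range_eq_range'] at hinner
    simp only [Nat.add_zero] at hinner
    rw [hinner]
    have hgrid : pvGridP n g r g = pvGridP n g (r + 1) 0 := by
      rw [pvGridP, pvGridP]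
      apply List.map_congr_left
      intro i hi
      by_cases h1 : i < r
      · rw [if_pos h1, if_pos (by omega : i < r + 1)]
      · by_cases h2 : i = r
        · subst h2
          rw [if_neg h1, if_pos rfl, if_pos (by omega : i < i + 1)]
        · rw [if_neg h1, if_neg h2, if_neg (by omega : ¬ i < r + 1)]
          by_cases h3 : i = r + 1
          · subst h3
            rw [if_pos rfl]
          · rw [if_neg h3]
    have hidx : ((r * g + g : Nat) : Int) = (((r + 1) * g : Nat) : Int) := by
      push_cast; ring
    rw [hgrid, hidx]
    exact ih (r + 1) (by omega)

theorem pv_fill_eq (n : Int) (hn : 0 ≤ n) (g : Nat) :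
    pvFillLoop n (g : Int)
      ((PySem.List.pyRange 0 (g : Int) 1).map (fun _ =>
        (PySem.List.pyRange 0 (g : Int) 1).map (fun _ => (-1 : Int))), 0)
    = (pvGridP n g g 0, min ((g * g : Nat) : Int) n) := by
  have hrow0 : ∀ r : Nat, pvRowP n g r 0 = (List.range g).map (fun _ => (-1 : Int)) := by
    intro r
    rw [pvRowP]
    apply List.map_congr_left
    intro j hj
    rw [if_neg (by omega)]
  unfold pvFillLoop
  simp only [PySem.List.pyRange_zero_natCast, List.foldl_map, List.map_map]
  simp only [Function.comp_def]
  have houter := pv_fill_outer n g g 0 (by omega)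
  rw [← List.range_eq_range'] at houter
  have hinit : ((List.range g).map (fun _ : Nat => (List.range g).map (fun _ : Nat => (-1 : Int))), (0 : Int))
      = (pvGridP n g 0 0, min ((0 * g : Nat) : Int) n) := by
    rw [pvGridP]
    refine Prod.ext ?_ ?_
    · simp only []
      apply List.map_congr_left
      intro i hi
      rw [if_neg (by omega)]
      rcases eq_or_ne i 0 with h | h
      · subst h
        rw [if_pos rfl, hrow0]
      · rw [if_neg h, hrow0]
    · simp only [Nat.zero_mul, Nat.cast_zero]
      exact (min_eq_left hn).symm
  rw [hinit]
  exact houter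

theorem pv_gridAt_full (n : Int) (g : Nat) (i j : Int)
    (h0 : 0 ≤ i) (h1 : i < (g : Int)) (h2 : 0 ≤ j) (h3 : j < (g : Int)) :
    pvGridAt (pvGridP n g g 0) i j
      = if i * (g : Int) + j < n then i * (g : Int) + j else -1 := by
  have hiN : i.toNat < g := by omega
  have hjN : j.toNat < g := by omega
  have hcast : ((i.toNat * g + j.toNat : Nat) : Int) = i * (g : Int) + j := by
    push_cast [Int.toNat_of_nonneg h0, Int.toNat_of_nonneg h2]
    ring
  rw [pvGridAt, pvGridP]
  rw [PySem.List.pyGetD_eq_getElem _ _ h0 (by simpa using h1)]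
  simp only [List.getElem_map, List.getElem_range]
  rw [if_pos hiN]
  rw [PySem.List.pyGetD_eq_getElem _ _ h2 (by simpa [pvRowP] using h3)]
  simp only [pvRowP, List.getElem_map, List.getElem_range]
  rw [hcast, if_congr (and_iff_right hjN) rfl rfl]

theorem pv_spiral_exit (n : Int) (G : List (List Int)) (fuel : Nat) (t b l r : Int)
    (acc : List Int) (h : ¬ (t ≤ b ∧ l ≤ r)) : pvSpiral n G fuel t b l r acc = acc := by
  cases fuel with
  | zero => rfl
  | succ fuel => rw [pvSpiral, if_neg h]

theorem pv_spiral_rings (n gI : Int) (hg : 0 ≤ gI) (G : List (List Int))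
    (HG : ∀ i j : Int, 0 ≤ i → i < gI → 0 ≤ j → j < gI →
      pvGridAt G i j = if i * gI + j < n then i * gI + j else -1) :
    ∀ (f : Nat) (k hi : Int) (acc : List Int), (hi + 1 - k).toNat ≤ f → 0 ≤ k → k + hi = gI - 1 →
    pvSpiral n G f k hi k hi acc
      = acc ++ (PySem.List.pyRange k (PySem.Int.floordiv (gI + 1) 2) 1).flatMap (pvRing n gI) := by
  have hM : PySem.Int.floordiv (gI + 1) 2 = (gI + 1) / 2 := by
    have h : PySem.Int.floordiv (gI + 1) 2 = Int.fdiv (gI + 1) 2 := by rfl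
    rw [h, Int.fdiv_eq_ediv]
    norm_num
  have hrow : ∀ (r : Int), 0 ≤ r → r < gI → ∀ (l : List Int), (∀ x ∈ l, 0 ≤ x ∧ x < gI) →
      ∀ (acc : List Int),
      l.foldl (fun acc c => if pvGridAt G r c ≠ -1 then acc ++ [pvGridAt G r c] else acc) acc
        = acc ++ (l.map (fun c => r * gI + c)).filter (fun i => decide (i < n)) := by
    intro r hr0 hr1 l hl acc
    rw [pv_foldl_append_ite, List.filter_map]
    have hfil : l.filter (fun x => decide (pvGridAt G r x ≠ -1))
        = l.filter ((fun i => decide (i < n)) ∘ (fun c => r * gI + c)) := by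
      apply List.filter_congr
      intro x hx
      obtain ⟨hx0, hx1⟩ := hl x hx
      rw [Function.comp_apply, HG r x hr0 hr1 hx0 hx1]
      have hval : 0 ≤ r * gI + x := add_nonneg (mul_nonneg hr0 (by omega)) hx0
      by_cases hv : r * gI + x < n
      · simp [hv, show r * gI + x ≠ -1 from by omega]
      · simp [hv]
    rw [hfil]
    apply congrArg
    apply List.map_congr_left
    intro x hx
    obtain ⟨hx1, hx2⟩ := List.mem_filter.mp hx
    obtain ⟨hx0, hx1'⟩ := hl x hx1
    rw [HG r x hr0 hr1 hx0 hx1', if_pos (by simpa using hx2)]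
  have hcol : ∀ (c : Int), 0 ≤ c → c < gI → ∀ (l : List Int), (∀ x ∈ l, 0 ≤ x ∧ x < gI) →
      ∀ (acc : List Int),
      l.foldl (fun acc r => if pvGridAt G r c ≠ -1 then acc ++ [pvGridAt G r c] else acc) acc
        = acc ++ (l.map (fun r => r * gI + c)).filter (fun i => decide (i < n)) := by
    intro c hc0 hc1 l hl acc
    rw [pv_foldl_append_ite, List.filter_map]
    have hfil : l.filter (fun x => decide (pvGridAt G x c ≠ -1))
        = l.filter ((fun i => decide (i < n)) ∘ (fun r => r * gI + c)) := by
      apply List.filter_congr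
      intro x hx
      obtain ⟨hx0, hx1⟩ := hl x hx
      rw [Function.comp_apply, HG x c hx0 hx1 hc0 hc1]
      have hval : 0 ≤ x * gI + c := add_nonneg (mul_nonneg hx0 (by omega)) hc0
      by_cases hv : x * gI + c < n
      · simp [hv, show x * gI + c ≠ -1 from by omega]
      · simp [hv]
    rw [hfil]
    apply congrArg
    apply List.map_congr_left
    intro x hx
    obtain ⟨hx1, hx2⟩ := List.mem_filter.mp hx
    obtain ⟨hx0, hx1'⟩ := hl x hx1
    rw [HG x c hx0 hx1' hc0 hc1, if_pos (by simpa using hx2)]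
  intro f
  induction f with
  | zero =>
    intro k hi acc hf h0 hsum
    rw [pv_spiral_exit _ _ _ _ _ _ _ _ (by omega)]
    rw [hM, PySem.List.pyRange_one_eq_nil (by omega)]
    simp
  | succ f ih =>
    intro k hi acc hf h0 hsum
    by_cases hk : k ≤ hi
    · have hhiG : hi < gI := by omega
      have hkM : k < (gI + 1) / 2 := by omega
      have hring : pvRing n gI k
          = (if k < gI - 1 - k then
              ((((PySem.List.pyRange k (gI - 1 - k + 1) 1).map (fun c => k * gI + c)
                ++ (PySem.List.pyRange (k + 1) (gI - 1 - k + 1) 1).map (fun r => r * gI + (gI - 1 - k)))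
                ++ (PySem.List.pyRange (gI - 1 - k - 1) (k - 1) (-1)).map (fun c => (gI - 1 - k) * gI + c))
                ++ (PySem.List.pyRange (gI - 1 - k - 1) k (-1)).map (fun r => r * gI + k))
            else ((PySem.List.pyRange k (gI - 1 - k + 1) 1).map (fun c => k * gI + c)
                ++ (PySem.List.pyRange (k + 1) (gI - 1 - k + 1) 1).map (fun r => r * gI + (gI - 1 - k)))).filter
              (fun i => decide (i < n)) := by
        simp only [pvRing]
      have hhi : gI - 1 - k = hi := by omega
      rw [hhi] at hring
      rw [pvSpiral, if_pos (⟨hk, hk⟩ : k ≤ hi ∧ k ≤ hi)]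
      by_cases hklt : k < hi
      · have hb : k + 1 ≤ hi := by omega
        have hl2 : k ≤ hi - 1 := by omega
        simp only [if_pos hb, if_pos hl2]
        rw [hrow k h0 (by omega) _ (fun x hx => by
          rw [PySem.List.mem_pyRange_one] at hx; omega) acc]
        rw [hcol hi (by omega) hhiG _ (fun x hx => by
          rw [PySem.List.mem_pyRange_one] at hx; omega)]
        rw [hrow hi (by omega) hhiG _ (fun x hx => by
          rw [PySem.List.mem_pyRange_neg_one] at hx; omega)]
        rw [hcol k h0 (by omega) _ (fun x hx => by
          rw [PySem.List.mem_pyRange_neg_one] at hx; omega)]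
        rw [ih (k + 1) (hi - 1) _ (by omega) (by omega) (by omega)]
        simp only [hM]
        conv_rhs => rw [PySem.List.pyRange_one_cons hkM, List.flatMap_cons]
        rw [hring, if_pos hklt]
        simp [List.filter_append, List.append_assoc]
      · have hbe : ¬ k + 1 ≤ hi := by omega
        have hle : ¬ k ≤ hi - 1 := by omega
        simp only [if_neg hbe, if_neg hle]
        rw [hrow k h0 (by omega) _ (fun x hx => by
          rw [PySem.List.mem_pyRange_one] at hx; omega) acc]
        rw [hcol hi (by omega) hhiG _ (fun x hx => by
          rw [PySem.List.mem_pyRange_one] at hx; omega)]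
        rw [pv_spiral_exit _ _ _ _ _ _ _ _ (by omega)]
        rw [hM]
        have hM2 : (gI + 1) / 2 = k + 1 := by omega
        rw [hM2]
        conv_rhs => rw [PySem.List.pyRange_one_singleton]
        simp only [List.flatMap_cons, List.flatMap_nil]
        rw [hring, if_neg hklt]
        rw [PySem.List.pyRange_one_eq_nil (by omega : hi + 1 ≤ k + 1)]
        simp
    · rw [pv_spiral_exit _ _ _ _ _ _ _ _ (by omega)]
      rw [hM, PySem.List.pyRange_one_eq_nil (by omega)]
      simp

theorem pv_main (n : Int) (hn : 0 ≤ n) (gI : Int) (hg : 0 ≤ gI) :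
    pvSpiral n (pvFillLoop n gI
        ((PySem.List.pyRange 0 gI 1).map (fun _ =>
          (PySem.List.pyRange 0 gI 1).map (fun _ => (-1 : Int))), 0)).1
      (gI + 1).toNat 0 (gI - 1) 0 (gI - 1) []
    = (PySem.List.pyRange 0 (PySem.Int.floordiv (gI + 1) 2) 1).foldl
        (fun out k => out ++ pvRing n gI k) [] := by
  obtain ⟨g, rfl⟩ : ∃ g : Nat, (g : Int) = gI := ⟨gI.toNat, Int.toNat_of_nonneg hg⟩
  rw [pv_fill_eq n hn g]
  rw [PySem.List.foldl_append_eq_flatMap]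
  exact pv_spiral_rings n (g : Int) (by positivity) (pvGridP n g g 0)
    (fun i j h0 h1 h2 h3 => pv_gridAt_full n g i j h0 h1 h2 h3)
    ((g : Int) + 1).toNat 0 ((g : Int) - 1) [] (by omega) (le_refl 0) (by ring)

-- ===== VERDICT (by name: the statement is the Claim_ definition above) =====
theorem get_spiral_indices_spec : Claim_equal_get_spiral_indices := by
  unfold Claim_equal_get_spiral_indices
  intro n hdom hpre
  unfold Spec_get_spiral_indices get_spiral_indices get_spiral_indices_alt
  simp only []
  exact pv_main n hpre _ (by
    have := Int.sqrt_nonneg n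
    split_ifs <;> omega)
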